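-- pv_equiv track=rewrite | github.com/r-bex/dingdongdata | src/analysis/names.py | _generate_name_words
-- ===== SOURCE A (Python) =====
-- def _generate_name_words(name: str) -> list[str]: # TODO: name this function better
--     """TODO: docstring"""
--     words = []
--     for word in name.split(" "):
--         if "-" in word:
--             words += word.split("-")
--         else:
--             words.append(word)
--     return set(words)
-- ===== SOURCE B (Python) =====
-- def _generate_name_words(name: str) -> list[str]:
--     """Single character-level scan: accumulate the current word, emit it into the
--     set at every space or hyphen (no split calls, no per-word hyphen branch)."""
--     words = set()
--     cur = []
--     for ch in name:
--         if ch == " " or ch == "-":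
--             words.add("".join(cur))
--             cur = []
--         else:
--             cur.append(ch)
--     words.add("".join(cur))
--     return words
-- ===== Notes on version B (the rewrite author's own statement) =====
-- stated objective: alternative
-- what changed: Replaced A's split-on-space loop with a per-word hyphen re-split by a single character-level scan that accumulates the current word and emits it into the set at every space or hyphen delimiter.
import Mathlib
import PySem

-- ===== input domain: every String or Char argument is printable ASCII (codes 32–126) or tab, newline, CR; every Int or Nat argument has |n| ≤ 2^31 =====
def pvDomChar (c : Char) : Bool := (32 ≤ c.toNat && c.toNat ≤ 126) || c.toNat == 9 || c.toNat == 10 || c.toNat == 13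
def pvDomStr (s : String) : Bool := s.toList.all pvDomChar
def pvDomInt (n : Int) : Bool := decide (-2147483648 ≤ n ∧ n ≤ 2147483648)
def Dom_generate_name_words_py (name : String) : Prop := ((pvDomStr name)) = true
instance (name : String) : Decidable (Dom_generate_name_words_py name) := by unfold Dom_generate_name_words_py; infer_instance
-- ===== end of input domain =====

-- B replaces A's split-on-space loop (with a per-word hyphen re-split) by a single
-- character-level scan that accumulates the current word and emits it into the set at
-- every space or hyphen; objective: alternative (same cost, different traversal).
-- Python's set() iteration order is not modelled: both ports build a PySem.Set
-- (distinct elements, first occurrences), compared as a finite set.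

-- ===== PORT A =====
def generate_name_words_py (name : String) : List String :=
  let words := ((PySem.Str.split? name " ").getD []).foldl
    (fun words word =>
      if PySem.Str.isIn "-" word then words ++ (PySem.Str.split? word "-").getD []
      else words ++ [word]) []
  PySem.Set.ofList words

-- ===== PORT B =====
-- "".join(cur) for cur a list of single characters is String.ofList cur (exact).
def generate_name_words_py_alt (name : String) : List String :=
  let st := name.toList.foldl
    (fun (st : PySem.Set String × List Char) ch =>
      if ch = ' ' || ch = '-' then (PySem.Set.add st.1 (String.ofList st.2), [])
      else (st.1, st.2 ++ [ch]))
    (PySem.Set.empty, [])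
  PySem.Set.add st.1 (String.ofList st.2)

-- ===== PRECONDITION & SPEC =====
def Spec_generate_name_words_py (name : String) (out : List String) : Prop := out = generate_name_words_py_alt name
instance (name : String) (out : List String) : Decidable (Spec_generate_name_words_py name out) := by unfold Spec_generate_name_words_py; infer_instance

-- ===== CLAIM (what is proved, stated in full; the proofs are below) =====
def Claim_equal_generate_name_words_py : Prop := ∀ (name : String), Dom_generate_name_words_py name → Spec_generate_name_words_py name (generate_name_words_py name)

-- ===== LEMMAS AND PROOFS =====

-- Reference single-character splitter: mySplit d l = l split at every occurrence of d.
def mySplit (d : Char) : List Char → List (List Char)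
  | [] => [[]]
  | c :: t => if c = d then [] :: mySplit d t else (mySplit d t).modifyHead (c :: ·)

-- Two-delimiter splitter: l split at every space or hyphen (B's scan computes this).
def mySplit2 : List Char → List (List Char)
  | [] => [[]]
  | c :: t => if c = ' ' ∨ c = '-' then [] :: mySplit2 t else (mySplit2 t).modifyHead (c :: ·)

theorem mySplit_ne_nil (d : Char) (l : List Char) : mySplit d l ≠ [] := by
  cases l with
  | nil => simp [mySplit]
  | cons c t =>
    simp only [mySplit]
    split
    · simp
    · exact fun h => mySplit_ne_nil d t (List.modifyHead_eq_nil_iff.mp h)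

theorem mySplit2_ne_nil (l : List Char) : mySplit2 l ≠ [] := by
  cases l with
  | nil => simp [mySplit2]
  | cons c t =>
    simp only [mySplit2]
    split
    · simp
    · exact fun h => mySplit2_ne_nil t (List.modifyHead_eq_nil_iff.mp h)

-- PySem's fuel-based splitOn.go, characterized at a single-character separator.
theorem go_single (d : Char) (l cur : List Char) (acc : List (List Char)) :
    PySem.Chars.splitOn.go [d] (l.length + 1) l cur acc
      = acc.reverse ++ (mySplit d l).modifyHead (cur.reverse ++ ·) := by
  induction l generalizing cur acc with
  | nil => simp [PySem.Chars.splitOn.go, mySplit]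
  | cons c t ih =>
    have hlen : (c :: t).length + 1 = (t.length + 1) + 1 := by simp
    rw [hlen, PySem.Chars.splitOn.go]
    rcases ht : mySplit d t with _ | ⟨w, ws⟩
    · exact absurd ht (mySplit_ne_nil d t)
    by_cases h : d = c
    · subst h
      simp only [List.isPrefixOf, BEq.rfl, Bool.true_and, if_true, List.length_singleton,
        List.drop_one, List.tail_cons, ih, mySplit, ht]
      simp
    · have hpre : [d].isPrefixOf (c :: t) = false := by simp [List.isPrefixOf, h]
      rw [hpre]
      simp only [Bool.false_eq_true, if_false, ih, mySplit, ht, if_neg (Ne.symm h)]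
      simp

theorem splitOn_single (d : Char) (l : List Char) :
    PySem.Chars.splitOn l [d] = mySplit d l := by
  rw [PySem.Chars.splitOn, go_single]
  rcases ht : mySplit d l with _ | ⟨w, ws⟩
  · exact absurd ht (mySplit_ne_nil d l)
  · simp

theorem mySplit_not_mem (d : Char) (l : List Char) (h : d ∉ l) : mySplit d l = [l] := by
  induction l with
  | nil => rfl
  | cons c t ih =>
    simp at h
    simp [mySplit, Ne.symm h.1, ih h.2]

-- Re-splitting each space-piece at '-' = splitting once at both delimiters.
theorem flatMap_mySplit2 (l : List Char) :
    (mySplit ' ' l).flatMap (mySplit '-') = mySplit2 l := by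
  induction l with
  | nil => simp [mySplit, mySplit2]
  | cons c t ih =>
    rcases ht : mySplit ' ' t with _ | ⟨w, ws⟩
    · exact absurd ht (mySplit_ne_nil ' ' t)
    by_cases hs : c = ' '
    · subst hs
      simp [mySplit, mySplit2, ih]
    by_cases hd : c = '-'
    · subst hd
      simp only [mySplit, mySplit2, if_neg hs, ht,
        List.modifyHead_cons, List.flatMap_cons]
      rw [← ih, ht]
      simp [List.flatMap_cons, hs]
    · simp only [mySplit, mySplit2, if_neg hs, if_neg (fun h => Or.elim h hs hd), ht,
        List.modifyHead_cons, List.flatMap_cons]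
      rw [← ih, ht]
      rcases hw : mySplit '-' w with _ | ⟨v, vs⟩
      · exact absurd hw (mySplit_ne_nil '-' w)
      simp [List.flatMap_cons, hw, hd]

theorem split_sp (s : String) (d : Char) (sep : String) (hsep : sep.toList = [d]) :
    (PySem.Str.split? s sep).getD [] = (mySplit d s.toList).map String.ofList := by
  simp [PySem.Str.split?, PySem.Chars.split?, hsep, splitOn_single]

-- A's loop body appends, for every word, exactly that word's '-'-split.
theorem foldl_words (ps : List (List Char)) (acc : List String) :
    ps.foldl
      (fun words p =>
        if PySem.Str.isIn "-" (String.ofList p) then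
          words ++ (PySem.Str.split? (String.ofList p) "-").getD []
        else words ++ [String.ofList p]) acc
      = acc ++ (ps.flatMap (mySplit '-')).map String.ofList := by
  induction ps generalizing acc with
  | nil => simp
  | cons p ps ih =>
    simp only [List.foldl_cons, List.flatMap_cons, ih]
    by_cases h : PySem.Str.isIn "-" (String.ofList p) = true
    · rw [if_pos h, split_sp _ '-' "-" rfl]
      simp
    · rw [if_neg h]
      have hmem : '-' ∉ p := by
        have hni := (PySem.Chars.isIn_eq_false_iff "-".toList (String.ofList p).toList).mp
          (by simpa [PySem.Str.isIn] using eq_false_of_ne_true h)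
        intro hm
        exact hni (by simpa using (List.singleton_infix_iff '-' p).mpr hm)
      rw [mySplit_not_mem '-' p hmem]
      simp

theorem words_eq (s : String) :
    (((PySem.Str.split? s " ").getD []).foldl
      (fun words word =>
        if PySem.Str.isIn "-" word then words ++ (PySem.Str.split? word "-").getD []
        else words ++ [word]) [])
      = (mySplit2 s.toList).map String.ofList := by
  rw [split_sp s ' ' " " rfl, List.foldl_map, foldl_words, flatMap_mySplit2]
  simp

-- B's scan invariant: with pending word cur, finishing the scan and adding the last
-- word equals folding Set.add over the remaining pieces (first piece prefixed by cur).
theorem alt_go (l : List Char) (s : PySem.Set String) (cur : List Char) :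
    PySem.Set.add
      (l.foldl
        (fun (st : PySem.Set String × List Char) ch =>
          if ch = ' ' || ch = '-' then (PySem.Set.add st.1 (String.ofList st.2), [])
          else (st.1, st.2 ++ [ch])) (s, cur)).1
      (String.ofList
        (l.foldl
          (fun (st : PySem.Set String × List Char) ch =>
            if ch = ' ' || ch = '-' then (PySem.Set.add st.1 (String.ofList st.2), [])
            else (st.1, st.2 ++ [ch])) (s, cur)).2)
      = (((mySplit2 l).modifyHead (cur ++ ·)).map String.ofList).foldl PySem.Set.add s := by
  induction l generalizing s cur with
  | nil => simp [mySplit2]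
  | cons c t ih =>
    rcases ht : mySplit2 t with _ | ⟨w, ws⟩
    · exact absurd ht (mySplit2_ne_nil t)
    by_cases hdelim : c = ' ' ∨ c = '-'
    · have hb : (c = ' ' || c = '-') = true := by
        rcases hdelim with h | h <;> simp [h]
      simp only [List.foldl_cons, hb, if_true, ih]
      simp [mySplit2, if_pos hdelim, ht]
    · simp only [List.foldl_cons, ih]
      simp [mySplit2, if_neg hdelim, ht]

-- ===== VERDICT (by name: the statement is the Claim_ definition above) =====
theorem generate_name_words_py_spec : Claim_equal_generate_name_words_py := by
  intro name _
  unfold Spec_generate_name_words_py generate_name_words_py generate_name_words_py_alt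
  simp only [words_eq, alt_go]
  rcases ht : mySplit2 name.toList with _ | ⟨w, ws⟩
  · exact absurd ht (mySplit2_ne_nil name.toList)
  simp [PySem.Set.ofList_eq_foldl, PySem.Set.empty]
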